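-- pv_equiv track=rewrite | github.com/eladsegal/tag-based-multi-span-extraction | src/data/dataset_readers/drop/drop_utils.py | clipped_passage_num
-- ===== SOURCE A (Python) =====
-- def clipped_passage_num(number_occurrences_in_passage, clipped_length):
--     if not number_occurrences_in_passage or number_occurrences_in_passage[-1]['indices'][0] < clipped_length:
--         return number_occurrences_in_passage
--     lo = 0
--     hi = len(number_occurrences_in_passage) - 1
--
--     while lo < hi:
--         mid = (lo + hi) // 2
--         if number_occurrences_in_passage[mid]['indices'][0] < clipped_length:
--             lo = mid + 1
--         else:
--             hi = mid
--
--     last_number_occurrence = number_occurrences_in_passage[lo - 1]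
--     last_number_occurrence['indices'] = [index for index in last_number_occurrence['indices'] if index < clipped_length]
--
--     return number_occurrences_in_passage[:lo]
-- ===== SOURCE B (Python) =====
-- def clipped_passage_num(number_occurrences_in_passage, clipped_length):
--     if not number_occurrences_in_passage:
--         return number_occurrences_in_passage
--     if number_occurrences_in_passage[-1]['indices'][0] < clipped_length:
--         return number_occurrences_in_passage
--     kept = []
--     for occurrence in number_occurrences_in_passage:
--         if occurrence['indices'][0] >= clipped_length:
--             break
--         kept.append(occurrence)
--     if kept:
--         last = kept[-1]
--         last['indices'] = [index for index in last['indices'] if index < clipped_length]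
--     return kept
-- ===== Notes on version B (the rewrite author's own statement) =====
-- stated objective: simpler
-- what changed: Instead of binary-searching for the cut index and slicing, B builds the kept prefix directly in one forward loop that breaks at the first occurrence whose indices[0] reaches the boundary, then filters the last kept occurrence's indices; the or-guard is split into two early returns.
import Mathlib
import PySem

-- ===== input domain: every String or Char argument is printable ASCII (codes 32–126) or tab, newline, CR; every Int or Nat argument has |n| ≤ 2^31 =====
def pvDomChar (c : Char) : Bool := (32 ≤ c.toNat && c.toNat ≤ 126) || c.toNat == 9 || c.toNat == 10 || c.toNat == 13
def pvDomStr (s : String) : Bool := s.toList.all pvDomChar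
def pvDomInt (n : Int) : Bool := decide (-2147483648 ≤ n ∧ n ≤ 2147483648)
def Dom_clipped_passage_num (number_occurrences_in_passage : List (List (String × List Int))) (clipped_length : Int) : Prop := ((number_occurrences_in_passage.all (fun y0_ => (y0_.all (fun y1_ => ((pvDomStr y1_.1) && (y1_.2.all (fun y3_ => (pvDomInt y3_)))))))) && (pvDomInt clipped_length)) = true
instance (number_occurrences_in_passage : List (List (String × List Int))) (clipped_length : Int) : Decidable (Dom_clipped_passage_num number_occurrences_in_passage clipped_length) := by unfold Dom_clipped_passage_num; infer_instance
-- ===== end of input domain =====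

-- B replaces A's binary-search-then-slice by a single forward loop that accumulates the kept
-- prefix and breaks at the first occurrence whose indices[0] reaches the boundary, then filters
-- the last kept occurrence's indices — simpler, same return value on Pre_.
-- Side effects: A mutates the dict at position lo-1 of the input in place even when lo = 0
-- (through noip[-1]); B mutates it only when the returned prefix is nonempty. The theorems here
-- are about the RETURN value only.

-- shared helper: e['indices'] (Python's dict built from the pairs) and its first element,
-- with defaults that are never reached inside Pre_
def pvIndices (e : List (String × List Int)) : List Int :=
  ((PySem.Dict.ofList e).get? "indices").getD []

def pvHd (e : List (String × List Int)) : Int := (pvIndices e).headD 0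

-- ===== PORT A =====
-- the while lo < hi binary-search loop (indices stay in range by construction, so getD's default is dead)
def pvBisect (noip : List (List (String × List Int))) (clip : Int) (lo hi : Nat) : Nat :=
  if h : lo < hi then
    let mid := (lo + hi) / 2
    if pvHd (noip.getD mid []) < clip then pvBisect noip clip (mid + 1) hi
    else pvBisect noip clip lo mid
  else lo
termination_by hi - lo
decreasing_by all_goals omega

def clipped_passage_num (number_occurrences_in_passage : List (List (String × List Int))) (clipped_length : Int) : List (List (String × List Int)) :=
  if number_occurrences_in_passage = [] ∨ pvHd ((PySem.List.pyGet? number_occurrences_in_passage (-1)).getD []) < clipped_length then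
    number_occurrences_in_passage
  else
    let lo := pvBisect number_occurrences_in_passage clipped_length 0 (number_occurrences_in_passage.length - 1)
    -- last_number_occurrence = noip[lo - 1]; its mutated dict replaces position lo - 1 of the
    -- returned slice noip[:lo] (for lo = 0 the slice is empty, so the noip[-1] mutation is invisible there)
    let last := (PySem.List.pyGet? number_occurrences_in_passage ((lo : Int) - 1)).getD []
    let newLast := ((PySem.Dict.ofList last).insert "indices" ((pvIndices last).filter (fun ix => decide (ix < clipped_length)))).items
    (number_occurrences_in_passage.take lo).set (lo - 1) newLast

-- ===== PORT B =====
-- the for-loop with break: accumulate occurrences until one has indices[0] >= clipped_length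
def pvKeep (clip : Int) : List (List (String × List Int)) → List (List (String × List Int))
  | [] => []
  | e :: rest => if clip ≤ pvHd e then [] else e :: pvKeep clip rest

def clipped_passage_num_alt (number_occurrences_in_passage : List (List (String × List Int))) (clipped_length : Int) : List (List (String × List Int)) :=
  if number_occurrences_in_passage = [] then number_occurrences_in_passage
  else if pvHd ((PySem.List.pyGet? number_occurrences_in_passage (-1)).getD []) < clipped_length then
    number_occurrences_in_passage
  else
    let kept := pvKeep clipped_length number_occurrences_in_passage
    -- if kept: kept[-1]['indices'] = [...] (the dict assignment keeps the key's position)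
    match kept.getLast? with
    | none => kept
    | some last =>
        kept.set (kept.length - 1)
          (((PySem.Dict.ofList last).insert "indices" ((pvIndices last).filter (fun ix => decide (ix < clipped_length)))).items)

-- ===== PRECONDITION & SPEC =====
def pvHasInd (e : List (String × List Int)) : Bool :=
  match (PySem.Dict.ofList e).get? "indices" with
  | some (_ :: _) => true
  | _ => false

-- Pre_ excludes (a) inputs on which A raises KeyError/IndexError reading some entry's 'indices'
-- (which entries A probes is an accident of the binary search, so all entries must carry a nonempty
-- 'indices' once the guard fails), and (b) lists of length ≥ 3 not sorted by indices[0], on which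
-- A's binary-search result is accidental (for length ≤ 2 the search is trivial and A = B anyway).
def Pre_clipped_passage_num (number_occurrences_in_passage : List (List (String × List Int))) (clipped_length : Int) : Prop :=
  number_occurrences_in_passage = [] ∨
    (pvHasInd (number_occurrences_in_passage.getLastD []) = true ∧
      (pvHd (number_occurrences_in_passage.getLastD []) < clipped_length ∨
        (number_occurrences_in_passage.all pvHasInd = true ∧
          ((number_occurrences_in_passage.map pvHd).Pairwise (· ≤ ·) ∨
            number_occurrences_in_passage.length ≤ 2))))

instance (number_occurrences_in_passage : List (List (String × List Int))) (clipped_length : Int) : Decidable (Pre_clipped_passage_num number_occurrences_in_passage clipped_length) := by unfold Pre_clipped_passage_num; infer_instance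

def pvWitness_clipped_passage_num : (List (List (String × List Int))) × Int :=
  ([[("indices", [0]), ("x", [3])], [("indices", [4, 1])]], 3)

def Spec_clipped_passage_num (number_occurrences_in_passage : List (List (String × List Int))) (clipped_length : Int) (out : List (List (String × List Int))) : Prop := out = clipped_passage_num_alt number_occurrences_in_passage clipped_length
instance (number_occurrences_in_passage : List (List (String × List Int))) (clipped_length : Int) (out : List (List (String × List Int))) : Decidable (Spec_clipped_passage_num number_occurrences_in_passage clipped_length out) := by unfold Spec_clipped_passage_num; infer_instance

-- ===== CLAIM (what is proved, stated in full; the proofs are below) =====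
def Claim_equal_clipped_passage_num : Prop := ∀ (number_occurrences_in_passage : List (List (String × List Int))) (clipped_length : Int), Dom_clipped_passage_num number_occurrences_in_passage clipped_length → Pre_clipped_passage_num number_occurrences_in_passage clipped_length → Spec_clipped_passage_num number_occurrences_in_passage clipped_length (clipped_passage_num number_occurrences_in_passage clipped_length)

-- ===== LEMMAS AND PROOFS =====

-- heads are monotone along a Pairwise-(≤)-sorted map
theorem pvHd_mono (noip : List (List (String × List Int)))
    (hsort : (noip.map pvHd).Pairwise (· ≤ ·)) {i j : Nat} (hij : i ≤ j) (hj : j < noip.length) :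
    pvHd (noip.getD i []) ≤ pvHd (noip.getD j []) := by
  rcases Nat.lt_or_ge i j with h | h
  · have hi : i < noip.length := lt_trans h hj
    rw [List.getD_eq_getElem _ _ hi, List.getD_eq_getElem _ _ hj]
    have := (List.pairwise_iff_getElem.mp hsort) i j
      (by simpa using hi) (by simpa using hj) h
    simpa using this
  · have : i = j := le_antisymm hij h
    subst this; exact le_refl _

-- the kept prefix is a take, all kept heads are below clip, and the first dropped head is not
theorem pvKeep_spec (clip : Int) :
    ∀ (l : List (List (String × List Int))),
      pvKeep clip l = l.take (pvKeep clip l).length ∧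
      (pvKeep clip l).length ≤ l.length ∧
      (∀ j, j < (pvKeep clip l).length → pvHd (l.getD j []) < clip) ∧
      ((pvKeep clip l).length < l.length → clip ≤ pvHd (l.getD (pvKeep clip l).length [])) := by
  intro l
  induction l with
  | nil => simp [pvKeep]
  | cons e rest ih =>
    obtain ⟨ih1, ih2, ih3, ih4⟩ := ih
    by_cases h : clip ≤ pvHd e
    · rw [pvKeep, if_pos h]
      refine ⟨by simp, by simp, by simp, by simpa using h⟩
    · rw [pvKeep, if_neg h]
      refine ⟨by simpa using ih1, by simpa using ih2, ?_, ?_⟩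
      · intro j hj
        match j with
        | 0 => simpa using lt_of_not_ge h
        | Nat.succ j' =>
          simp only [List.length_cons] at hj
          simpa using ih3 j' (by omega)
      · intro hlt
        simp only [List.length_cons] at hlt
        simpa using ih4 (by omega)

-- the binary search returns the first crossing index (sorted heads, crossing at hi, none below lo)
theorem pvBisect_spec (noip : List (List (String × List Int))) (clip : Int)
    (hsort : (noip.map pvHd).Pairwise (· ≤ ·)) :
    ∀ (d lo hi : Nat), hi - lo ≤ d → lo ≤ hi → hi < noip.length →
      (∀ i, i < lo → pvHd (noip.getD i []) < clip) → clip ≤ pvHd (noip.getD hi []) →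
      pvBisect noip clip lo hi < noip.length ∧
      clip ≤ pvHd (noip.getD (pvBisect noip clip lo hi) []) ∧
      (∀ j, j < pvBisect noip clip lo hi → pvHd (noip.getD j []) < clip) := by
  intro d
  induction d with
  | zero =>
    intro lo hi hd hlh hn hlow hhi
    have : lo = hi := by omega
    subst this
    rw [pvBisect, dif_neg (by omega)]
    exact ⟨hn, hhi, hlow⟩
  | succ d ih =>
    intro lo hi hd hlh hn hlow hhi
    by_cases h : lo < hi
    · rw [pvBisect, dif_pos h]
      simp only
      by_cases hm : pvHd (noip.getD ((lo + hi) / 2) []) < clip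
      · rw [if_pos hm]
        refine ih ((lo + hi) / 2 + 1) hi (by omega) (by omega) hn ?_ hhi
        intro i hi'
        by_cases hil : i < lo
        · exact hlow i hil
        · exact lt_of_le_of_lt (pvHd_mono noip hsort (by omega) (by omega)) hm
      · rw [if_neg hm]
        exact ih lo ((lo + hi) / 2) (by omega) (by omega) (by omega) hlow (le_of_not_gt hm)
    · have : lo = hi := by omega
      subst this
      rw [pvBisect, dif_neg (by omega)]
      exact ⟨hn, hhi, hlow⟩

-- with the guard failed and Pre_, A's lo equals the length of B's kept prefix
theorem pvLo_eq_keepLen (noip : List (List (String × List Int))) (clip : Int)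
    (hne : noip ≠ []) (hguard : clip ≤ pvHd (noip.getLastD []))
    (hcase : (noip.map pvHd).Pairwise (· ≤ ·) ∨ noip.length ≤ 2) :
    pvBisect noip clip 0 (noip.length - 1) = (pvKeep clip noip).length := by
  have hlen : 0 < noip.length := List.length_pos_iff.mpr hne
  have hgetD : noip.getD (noip.length - 1) [] = noip.getLastD [] := by
    rw [List.getD_eq_getElem _ _ (by omega), List.getLastD_eq_getLast?,
      List.getLast?_eq_some_getLast (h := hne), List.getLast_eq_getElem]
    simp
  rcases hcase with hsort | hsmall
  · have hB := pvBisect_spec noip clip hsort (noip.length - 1) 0 (noip.length - 1)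
      (le_refl _) (by omega) (by omega) (by intro i h; omega) (by rw [hgetD]; exact hguard)
    obtain ⟨hB1, hB2, hB3⟩ := hB
    obtain ⟨_, hK2, hK3, hK4⟩ := pvKeep_spec clip noip
    have hKlt : (pvKeep clip noip).length < noip.length := by
      rcases Nat.lt_or_ge (pvKeep clip noip).length noip.length with h | h
      · exact h
      · have heq : (pvKeep clip noip).length = noip.length := le_antisymm hK2 h
        have := hK3 (noip.length - 1) (by omega)
        rw [hgetD] at this
        exact absurd hguard (not_le_of_gt this)
    rcases Nat.lt_trichotomy (pvBisect noip clip 0 (noip.length - 1)) (pvKeep clip noip).length with h | h | h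
    · exact absurd hB2 (not_le_of_gt (hK3 _ h))
    · exact h
    · exact absurd (hK4 hKlt) (not_le_of_gt (hB3 _ h))
  · match noip, hne with
    | [a], _ =>
      have ha : clip ≤ pvHd a := by simpa [List.getLastD] using hguard
      rw [pvBisect, pvKeep, dif_neg (by simp), if_pos ha]
      simp
    | [a, b], _ =>
      have hb : clip ≤ pvHd b := by simpa [List.getLastD] using hguard
      by_cases ha : pvHd a < clip
      · rw [pvBisect, dif_pos (by simp)]
        simp only [List.length_cons, List.length_nil]
        norm_num
        rw [if_pos (by simpa using ha), pvBisect, dif_neg (by omega),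
          pvKeep, if_neg (by simpa using not_le_of_gt ha), pvKeep, if_pos hb]
        simp
      · rw [pvBisect, dif_pos (by simp)]
        simp only [List.length_cons, List.length_nil]
        norm_num
        rw [if_neg (by simpa using ha), pvBisect, dif_neg (by omega),
          pvKeep, if_pos (by simpa using le_of_not_gt ha)]
        simp
    | a :: b :: c :: rest, _ => simp at hsmall

-- ===== VERDICT (by name: the statement is the Claim_ definition above) =====
theorem clipped_passage_num_spec : Claim_equal_clipped_passage_num := by
  intro noip clip _ hpre
  unfold Spec_clipped_passage_num
  by_cases hemp : noip = []
  · rw [clipped_passage_num, clipped_passage_num_alt, if_pos (Or.inl hemp), if_pos hemp]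
  · by_cases hlt : pvHd ((PySem.List.pyGet? noip (-1)).getD []) < clip
    · rw [clipped_passage_num, clipped_passage_num_alt, if_pos (Or.inr hlt), if_neg hemp, if_pos hlt]
    · have hlast : (PySem.List.pyGet? noip (-1)).getD [] = noip.getLastD [] := by
        rw [PySem.List.pyGet?_neg_one, List.getLastD_eq_getLast?]
      have hguard : clip ≤ pvHd (noip.getLastD []) := by
        rw [← hlast]; exact le_of_not_gt hlt
      have hcase : (noip.map pvHd).Pairwise (· ≤ ·) ∨ noip.length ≤ 2 := by
        rcases hpre with h | ⟨_, h | h⟩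
        · exact absurd h hemp
        · rw [← hlast] at h; exact absurd h hlt
        · exact h.2
      have hlo := pvLo_eq_keepLen noip clip hemp hguard hcase
      obtain ⟨hK1, hK2, _, _⟩ := pvKeep_spec clip noip
      rw [clipped_passage_num, clipped_passage_num_alt,
        if_neg (by rintro (h | h); exacts [hemp h, hlt h]), if_neg hemp, if_neg hlt]
      simp only [hlo]
      set K := (pvKeep clip noip).length with hKdef
      match hK : pvKeep clip noip, hKd : K, hKdef with
      | [], 0, _ =>
        -- lo = 0: A returns ([].set 0 _) = []; B's kept is empty
        simp
      | e :: es, Nat.succ k, hKdef =>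
        have hKle : k + 1 ≤ noip.length := by omega
        have htake : noip.take (k + 1) = e :: es := by
          rw [show k + 1 = k.succ from rfl, ← hK1]; exact hK
        have hKlen : (e :: es).length = k + 1 := by rw [← htake]; simp [List.length_take]; omega
        have hgetlast : (e :: es).getLast? = some (noip.getD k []) := by
          rw [List.getLast?_eq_getElem?, hKlen, Nat.add_sub_cancel, ← htake,
            List.getElem?_take_of_lt (by omega),
            List.getD_eq_getElem _ _ (by omega), List.getElem?_eq_getElem (by omega)]
        have hpy : (PySem.List.pyGet? noip ((k + 1 : Nat) - 1 : Int)).getD [] = noip.getD k [] := by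
          have h1 : ((k + 1 : Nat) : Int) - 1 = ((k : Nat) : Int) := by push_cast; ring
          rw [h1, PySem.List.pyGet?_natCast,
            List.getD_eq_getElem _ _ (by omega), List.getElem?_eq_getElem (by omega)]
          rfl
        simp only [hgetlast, hpy, htake]
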